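-- pv_equiv track=rewrite | github.com/yyytae0/algorithm-training | programmers/1-21.py | solution
-- ===== SOURCE A (Python) =====
-- def solution(babbling):
--     answer = 0
--     lst = ['aya', 'ye', 'woo', 'ma']
--     check = ['ayaaya', 'yeye', 'woowoo', 'mama']
--     for i in babbling:
--         d = i
--         for j in check:
--             if j in d:
--                 break
--         else:
--             for j in lst:
--                 d = d.replace(j, ' ')
--             d = d.replace(' ', '')
--             if not d:
--                 answer += 1
--     return answer
-- ===== SOURCE B (Python) =====
-- def solution(babbling):
--     tokens = {'a': 'aya', 'y': 'ye', 'w': 'woo', 'm': 'ma'}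
--     def valid(word):
--         i, prev = 0, ''
--         while i < len(word):
--             t = tokens.get(word[i], '')
--             if t == '' or t == prev or not word.startswith(t, i):
--                 return False
--             i += len(t)
--             prev = t
--         return True
--     return sum(map(valid, babbling))
-- ===== Notes on version B (the rewrite author's own statement) =====
-- stated objective: alternative
-- what changed: B replaces A's per-word doubled-substring scan followed by replace-all-four-sounds-with-space-and-check-empty (several full passes over the word) with a single left-to-right parse that matches the unique sound starting at the current position (the four first letters are distinct) and rejects a sound equal to the previous one; Pre_ excludes babbling lists in which some word is a space-containing sound/space mix accepted by the grammar, on which A's ' ' replacement placeholder merges with the word's real spaces and makes A count space-padded sound strings while B rejects the space.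
-- outside the precondition, e.g. on solution(['ma ma']): A returns 1, B returns 0; on solution(['aya aya', 'x x']): A returns 1, B returns 0
import Mathlib
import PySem

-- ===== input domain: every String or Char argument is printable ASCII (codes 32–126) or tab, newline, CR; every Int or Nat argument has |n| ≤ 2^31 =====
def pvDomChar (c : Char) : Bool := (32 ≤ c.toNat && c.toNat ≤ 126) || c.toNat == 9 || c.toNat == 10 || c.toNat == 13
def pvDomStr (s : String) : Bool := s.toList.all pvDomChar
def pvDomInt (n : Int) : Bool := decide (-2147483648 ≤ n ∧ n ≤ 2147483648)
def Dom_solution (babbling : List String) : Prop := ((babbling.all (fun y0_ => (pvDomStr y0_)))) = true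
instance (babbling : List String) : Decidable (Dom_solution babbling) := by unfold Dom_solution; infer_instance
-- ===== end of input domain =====

-- B re-implements the count by a single left-to-right token parse per word (prev-token state)
-- instead of A's doubled-substring scan + replace-all-with-' '-then-check-empty; same cost class,
-- different algorithm; return value only, no argument is mutated by either version.

-- ===== PORT A =====
def solution (babbling : List String) : Int :=
  babbling.foldl (fun answer i =>
    if ["ayaaya","yeye","woowoo","mama"].any (fun j => PySem.Str.isIn j i) then answer
    else
      let d := ["aya","ye","woo","ma"].foldl (fun d j => PySem.Str.replace d j " ") i
      let d := PySem.Str.replace d " " ""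
      if d = "" then answer + 1 else answer) 0

-- ===== PORT B =====
def bTokens : PySem.Dict Char (List Char) :=
  PySem.Dict.ofList [('a',['a','y','a']),('y',['y','e']),('w',['w','o','o']),('m',['m','a'])]

-- while loop of Source B, ported with fuel = word length (each iteration consumes at least one char)
def bValidGo : Nat → List Char → List Char → Bool
  | _, [], _ => true
  | 0, _ :: _, _ => false   -- fuel exhausted; unreachable when fuel ≥ length
  | fuel + 1, c :: rest, prev =>
    let t := PySem.Dict.getD bTokens c []
    if t = [] ∨ t = prev ∨ ¬ t.isPrefixOf (c :: rest) then false
    else bValidGo fuel ((c :: rest).drop t.length) t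

def bValid (cs : List Char) : Bool := bValidGo cs.length cs []

def solution_alt (babbling : List String) : Int :=
  (babbling.map (fun w => if bValid w.toList then (1:Int) else 0)).sum

-- ===== PRECONDITION & SPEC =====
-- The grammar of what A accepts, used by Pre_ below (independent of both ports): a sequence of
-- the sounds aya/ye/woo/ma and spaces with no sound twice in a row (a space resets the repetition
-- check); `sv cs p` parses cs, where p is the first letter of the previous sound (' ' = none).
def sv : List Char → Char → Bool
  | [], _ => true
  | ' ' :: r, _ => sv r ' '
  | 'a' :: 'y' :: 'a' :: r, p => p != 'a' && sv r 'a'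
  | 'y' :: 'e' :: r, p => p != 'y' && sv r 'y'
  | 'w' :: 'o' :: 'o' :: r, p => p != 'w' && sv r 'w'
  | 'm' :: 'a' :: r, p => p != 'm' && sv r 'm'
  | _, _ => false

-- Pre_ excludes babbling lists in which some word is a space-containing sound/space mix that the
-- grammar accepts: there A's use of ' ' as its replacement placeholder merges with the word's
-- real spaces, so A counts space-padded sound strings such as "ma ma" (A returns 1 on ["ma ma"],
-- B returns 0); that artifact of A's placeholder is excluded rather than reproduced.
def Pre_solution (babbling : List String) : Prop :=
  ∀ w ∈ babbling, ¬ (' ' ∈ w.toList ∧ sv w.toList ' ' = true)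
instance (babbling : List String) : Decidable (Pre_solution babbling) := by
  unfold Pre_solution; infer_instance

def pvWitness_solution : List String := ["aya", "wooyemawoo", "mama", ""]

def Spec_solution (babbling : List String) (out : Int) : Prop := out = solution_alt babbling
instance (babbling : List String) (out : Int) : Decidable (Spec_solution babbling out) := by
  unfold Spec_solution; infer_instance

-- ===== CLAIM (what is proved, stated in full; the proofs are below) =====
def Claim_equal_solution : Prop := ∀ (babbling : List String), Dom_solution babbling → Pre_solution babbling → Spec_solution babbling (solution babbling)

-- ===== LEMMAS AND PROOFS =====
def tokOf (c : Char) : List Char :=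
  if c = 'a' then ['a','y','a'] else if c = 'y' then ['y','e']
  else if c = 'w' then ['w','o','o'] else if c = 'm' then ['m','a'] else []

theorem replace_go_eq (old new : List Char) (hold : old ≠ []) :
    ∀ fuel l acc, l.length ≤ fuel →
      PySem.Chars.replace.go old new fuel l acc =
        acc.reverse ++ PySem.Chars.replace l old new := by
  intro fuel
  induction fuel using Nat.strong_induction_on with
  | _ fuel ih =>
    intro l acc hl
    match fuel, l with
    | 0, [] => simp [PySem.Chars.replace.go, PySem.Chars.replace, hold]
    | fuel + 1, [] => simp [PySem.Chars.replace.go, PySem.Chars.replace, hold]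
    | fuel + 1, c :: t =>
      have hfl : t.length ≤ fuel := by simpa using hl
      have hrepl : PySem.Chars.replace (c :: t) old new =
          PySem.Chars.replace.go old new (t.length + 1) (c :: t) [] := by
        simp [PySem.Chars.replace, hold]
      by_cases hp : old.isPrefixOf (c :: t)
      · have hdl : ((c :: t).drop old.length).length ≤ t.length := by
          have : 0 < old.length := List.length_pos_iff.mpr hold
          simp [List.length_drop]; omega
        have step : ∀ f acc', PySem.Chars.replace.go old new (f + 1) (c :: t) acc' =
            PySem.Chars.replace.go old new f ((c :: t).drop old.length) (new.reverse ++ acc') := by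
          intro f acc'
          conv_lhs => rw [PySem.Chars.replace.go]
          simp [hp]
        rw [step, ih fuel (Nat.lt_succ_self _) _ _ (le_trans hdl hfl), hrepl, step,
          ih t.length (Nat.lt_succ_of_le hfl) _ _ hdl]
        simp
      · have step : ∀ f acc', PySem.Chars.replace.go old new (f + 1) (c :: t) acc' =
            PySem.Chars.replace.go old new f t (c :: acc') := by
          intro f acc'
          conv_lhs => rw [PySem.Chars.replace.go]
          simp [hp]
        rw [step, ih fuel (Nat.lt_succ_self _) _ _ hfl, hrepl, step,
          ih t.length (Nat.lt_succ_of_le hfl) _ _ (Nat.le_refl _)]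
        simp

theorem replace_nil (old new : List Char) (hold : old ≠ []) :
    PySem.Chars.replace [] old new = [] := by
  simp [PySem.Chars.replace, hold, PySem.Chars.replace.go]

theorem replace_pos (old new : List Char) (c : Char) (t : List Char) (hold : old ≠ [])
    (hp : old.isPrefixOf (c :: t)) :
    PySem.Chars.replace (c :: t) old new =
      new ++ PySem.Chars.replace ((c :: t).drop old.length) old new := by
  have h2 : PySem.Chars.replace (c :: t) old new =
      PySem.Chars.replace.go old new t.length ((c :: t).drop old.length) new.reverse := by
    rw [show PySem.Chars.replace (c :: t) old new =
          PySem.Chars.replace.go old new (t.length+1) (c :: t) [] by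
        simp [PySem.Chars.replace, hold]]
    conv_lhs => rw [PySem.Chars.replace.go]
    simp [hp]
  have hdl : ((c :: t).drop old.length).length ≤ t.length := by
    have : 0 < old.length := List.length_pos_iff.mpr hold
    simp [List.length_drop]; omega
  rw [h2, replace_go_eq old new hold _ _ _ hdl]
  simp

theorem replace_neg (old new : List Char) (c : Char) (t : List Char) (hold : old ≠ [])
    (hp : ¬ old.isPrefixOf (c :: t)) :
    PySem.Chars.replace (c :: t) old new = c :: PySem.Chars.replace t old new := by
  have h2 : PySem.Chars.replace (c :: t) old new =
      PySem.Chars.replace.go old new t.length t [c] := by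
    rw [show PySem.Chars.replace (c :: t) old new =
          PySem.Chars.replace.go old new (t.length+1) (c :: t) [] by
        simp [PySem.Chars.replace, hold]]
    conv_lhs => rw [PySem.Chars.replace.go]
    simp [hp]
  rw [h2, replace_go_eq old new hold _ _ _ (Nat.le_refl _)]
  simp

def chain (cs : List Char) : List Char :=
  PySem.Chars.replace (PySem.Chars.replace (PySem.Chars.replace (PySem.Chars.replace
    (PySem.Chars.replace cs ['a','y','a'] [' ']) ['y','e'] [' ']) ['w','o','o'] [' '])
    ['m','a'] [' ']) [' '] []

def dub (cs : List Char) : Bool :=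
  [['a','y','a','a','y','a'],['y','e','y','e'],['w','o','o','w','o','o'],['m','a','m','a']].any
    (fun j => PySem.Chars.isIn j cs)


theorem single_isPrefixOf (x : Char) (X : List Char) :
    (([x] : List Char).isPrefixOf X) = (X.head? == some x) := by
  cases X with
  | nil => simp [List.isPrefixOf]
  | cons a b => simp [List.isPrefixOf, BEq.comm]

theorem head?_replace_sp (old : List Char) (hold : old ≠ []) (l : List Char) :
    (PySem.Chars.replace l old [' ']).head? =
      if old.isPrefixOf l then some ' ' else l.head? := by
  cases l with
  | nil =>
    obtain ⟨o, ot, rfl⟩ := List.exists_cons_of_ne_nil hold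
    simp [replace_nil _ _ hold, List.isPrefixOf]
  | cons c t =>
    by_cases hp : old.isPrefixOf (c :: t)
    · rw [replace_pos _ _ _ _ hold hp]; simp [hp]
    · rw [replace_neg _ _ _ _ hold hp]; simp [hp]

theorem head?_rep_sp_ne (old : List Char) (hold : old ≠ []) (l : List Char) (x : Char)
    (hx : x ≠ ' ') (hl : l.head? ≠ some x) :
    (PySem.Chars.replace l old [' ']).head? ≠ some x := by
  rw [head?_replace_sp old hold l]
  split
  · simpa using fun h => hx h.symm
  · exact hl

theorem rep_cons_ne (old new : List Char) (c : Char) (t : List Char)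
    (hold : old ≠ []) (h : old.head? ≠ some c) :
    PySem.Chars.replace (c :: t) old new = c :: PySem.Chars.replace t old new := by
  apply replace_neg _ _ _ _ hold
  obtain ⟨o, ot, rfl⟩ := List.exists_cons_of_ne_nil hold
  simp only [List.head?] at h
  simp [List.isPrefixOf]
  intro hoc
  exact absurd (by rw [hoc]) h

theorem pair_isPrefixOf_false (x y : Char) (X : List Char) (h : X.head? ≠ some x) :
    ([x, y].isPrefixOf X) = false := by
  cases X with
  | nil => simp [List.isPrefixOf]
  | cons a b =>
    simp only [List.head?] at h
    simp [List.isPrefixOf]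
    intro hax
    exact absurd (by rw [hax]) h

theorem chain_space (r : List Char) : chain (' ' :: r) = chain r := by
  unfold chain
  rw [rep_cons_ne ['a','y','a'] [' '] ' ' _ (by simp) (by decide), rep_cons_ne ['y','e'] [' '] ' ' _ (by simp) (by decide), rep_cons_ne ['w','o','o'] [' '] ' ' _ (by simp) (by decide), rep_cons_ne ['m','a'] [' '] ' ' _ (by simp) (by decide),
    replace_pos [' '] [] ' ' _ (by simp) (by simp [List.isPrefixOf])]
  simp

theorem chain_aya (r : List Char) : chain ('a' :: 'y' :: 'a' :: r) = chain r := by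
  unfold chain
  rw [replace_pos ['a','y','a'] [' '] 'a' ('y' :: 'a' :: r) (by simp) (by simp [List.isPrefixOf])]
  simp only [List.singleton_append, List.length_cons, List.length_nil, List.drop_succ_cons,
    List.drop_zero]
  rw [rep_cons_ne ['y','e'] [' '] ' ' _ (by simp) (by decide), rep_cons_ne ['w','o','o'] [' '] ' ' _ (by simp) (by decide), rep_cons_ne ['m','a'] [' '] ' ' _ (by simp) (by decide),
    replace_pos [' '] [] ' ' _ (by simp) (by simp [List.isPrefixOf])]
  simp

theorem chain_ye (r : List Char) : chain ('y' :: 'e' :: r) = chain r := by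
  unfold chain
  rw [rep_cons_ne ['a','y','a'] [' '] 'y' _ (by simp) (by decide), rep_cons_ne ['a','y','a'] [' '] 'e' _ (by simp) (by decide),
    replace_pos ['y','e'] [' '] 'y' _ (by simp) (by simp [List.isPrefixOf])]
  simp only [List.singleton_append, List.length_cons, List.length_nil, List.drop_succ_cons,
    List.drop_zero]
  rw [rep_cons_ne ['w','o','o'] [' '] ' ' _ (by simp) (by decide), rep_cons_ne ['m','a'] [' '] ' ' _ (by simp) (by decide),
    replace_pos [' '] [] ' ' _ (by simp) (by simp [List.isPrefixOf])]
  simp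

theorem chain_woo (r : List Char) : chain ('w' :: 'o' :: 'o' :: r) = chain r := by
  unfold chain
  rw [rep_cons_ne ['a','y','a'] [' '] 'w' _ (by simp) (by decide), rep_cons_ne ['a','y','a'] [' '] 'o' _ (by simp) (by decide), rep_cons_ne ['a','y','a'] [' '] 'o' _ (by simp) (by decide), rep_cons_ne ['y','e'] [' '] 'w' _ (by simp) (by decide), rep_cons_ne ['y','e'] [' '] 'o' _ (by simp) (by decide), rep_cons_ne ['y','e'] [' '] 'o' _ (by simp) (by decide),
    replace_pos ['w','o','o'] [' '] 'w' _ (by simp) (by simp [List.isPrefixOf])]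
  simp only [List.singleton_append, List.length_cons, List.length_nil, List.drop_succ_cons,
    List.drop_zero]
  rw [rep_cons_ne ['m','a'] [' '] ' ' _ (by simp) (by decide), replace_pos [' '] [] ' ' _ (by simp) (by simp [List.isPrefixOf])]
  simp

theorem chain_ma (r : List Char) (h : (['y','a'] : List Char).isPrefixOf r = false) :
    chain ('m' :: 'a' :: r) = chain r := by
  unfold chain
  rw [rep_cons_ne ['a','y','a'] [' '] 'm' _ (by simp) (by decide), replace_neg ['a','y','a'] [' '] 'a' r (by simp) (by simp [List.isPrefixOf, h]),
    rep_cons_ne ['y','e'] [' '] 'm' _ (by simp) (by decide), rep_cons_ne ['y','e'] [' '] 'a' _ (by simp) (by decide), rep_cons_ne ['w','o','o'] [' '] 'm' _ (by simp) (by decide), rep_cons_ne ['w','o','o'] [' '] 'a' _ (by simp) (by decide),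
    replace_pos ['m','a'] [' '] 'm' _ (by simp) (by simp [List.isPrefixOf])]
  simp only [List.singleton_append, List.length_cons, List.length_nil, List.drop_succ_cons,
    List.drop_zero]
  rw [replace_pos [' '] [] ' ' _ (by simp) (by simp [List.isPrefixOf])]
  simp

theorem chain_maya (r : List Char) : chain ('m' :: 'a' :: 'y' :: 'a' :: r) = 'm' :: chain r := by
  unfold chain
  rw [rep_cons_ne ['a','y','a'] [' '] 'm' _ (by simp) (by decide),
    replace_pos ['a','y','a'] [' '] 'a' ('y' :: 'a' :: r) (by simp) (by simp [List.isPrefixOf])]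
  simp only [List.singleton_append, List.length_cons, List.length_nil, List.drop_succ_cons,
    List.drop_zero]
  rw [rep_cons_ne ['y','e'] [' '] 'm' _ (by simp) (by decide), rep_cons_ne ['y','e'] [' '] ' ' _ (by simp) (by decide), rep_cons_ne ['w','o','o'] [' '] 'm' _ (by simp) (by decide), rep_cons_ne ['w','o','o'] [' '] ' ' _ (by simp) (by decide),
    replace_neg ['m','a'] [' '] 'm' _ (by simp) (by simp [List.isPrefixOf]),
    rep_cons_ne ['m','a'] [' '] ' ' _ (by simp) (by decide), rep_cons_ne [' '] [] 'm' _ (by simp) (by decide), replace_pos [' '] [] ' ' _ (by simp) (by simp [List.isPrefixOf])]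
  simp

theorem chain_a_ne (t : List Char) (h : (['y','a'] : List Char).isPrefixOf t = false) :
    chain ('a' :: t) = 'a' :: chain t := by
  unfold chain
  rw [replace_neg ['a','y','a'] [' '] 'a' t (by simp) (by simp [List.isPrefixOf, h]),
    rep_cons_ne ['y','e'] [' '] 'a' _ (by simp) (by decide), rep_cons_ne ['w','o','o'] [' '] 'a' _ (by simp) (by decide), rep_cons_ne ['m','a'] [' '] 'a' _ (by simp) (by decide), rep_cons_ne [' '] [] 'a' _ (by simp) (by decide)]

theorem chain_y_ne (t : List Char) (h : t.head? ≠ some 'e') :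
    chain ('y' :: t) = 'y' :: chain t := by
  have h2 : (PySem.Chars.replace t ['a','y','a'] [' ']).head? ≠ some 'e' :=
    head?_rep_sp_ne _ (by simp) _ _ (by decide) h
  unfold chain
  rw [rep_cons_ne ['a','y','a'] [' '] 'y' _ (by simp) (by decide),
    replace_neg ['y','e'] [' '] 'y' _ (by simp)
      (by simp [List.isPrefixOf, single_isPrefixOf]; simpa using h2),
    rep_cons_ne ['w','o','o'] [' '] 'y' _ (by simp) (by decide), rep_cons_ne ['m','a'] [' '] 'y' _ (by simp) (by decide), rep_cons_ne [' '] [] 'y' _ (by simp) (by decide)]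

theorem chain_w_ne1 (t : List Char) (h : t.head? ≠ some 'o') :
    chain ('w' :: t) = 'w' :: chain t := by
  have h2 : (PySem.Chars.replace (PySem.Chars.replace t ['a','y','a'] [' ']) ['y','e'] [' ']).head? ≠ some 'o' :=
    head?_rep_sp_ne _ (by simp) _ _ (by decide) (head?_rep_sp_ne _ (by simp) _ _ (by decide) h)
  unfold chain
  rw [rep_cons_ne ['a','y','a'] [' '] 'w' _ (by simp) (by decide), rep_cons_ne ['y','e'] [' '] 'w' _ (by simp) (by decide),
    replace_neg ['w','o','o'] [' '] 'w' _ (by simp)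
      (by simp [List.isPrefixOf, pair_isPrefixOf_false _ _ _ h2]),
    rep_cons_ne ['m','a'] [' '] 'w' _ (by simp) (by decide), rep_cons_ne [' '] [] 'w' _ (by simp) (by decide)]

theorem chain_w_ne2 (u : List Char) (h : u.head? ≠ some 'o') :
    chain ('w' :: 'o' :: u) = 'w' :: 'o' :: chain u := by
  have h2 : (PySem.Chars.replace (PySem.Chars.replace u ['a','y','a'] [' ']) ['y','e'] [' ']).head? ≠ some 'o' :=
    head?_rep_sp_ne _ (by simp) _ _ (by decide) (head?_rep_sp_ne _ (by simp) _ _ (by decide) h)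
  unfold chain
  rw [rep_cons_ne ['a','y','a'] [' '] 'w' _ (by simp) (by decide), rep_cons_ne ['a','y','a'] [' '] 'o' _ (by simp) (by decide), rep_cons_ne ['y','e'] [' '] 'w' _ (by simp) (by decide), rep_cons_ne ['y','e'] [' '] 'o' _ (by simp) (by decide),
    replace_neg ['w','o','o'] [' '] 'w' _ (by simp)
      (by simp [List.isPrefixOf, single_isPrefixOf]; simpa using h2),
    rep_cons_ne ['w','o','o'] [' '] 'o' _ (by simp) (by decide), rep_cons_ne ['m','a'] [' '] 'w' _ (by simp) (by decide), rep_cons_ne ['m','a'] [' '] 'o' _ (by simp) (by decide), rep_cons_ne [' '] [] 'w' _ (by simp) (by decide), rep_cons_ne [' '] [] 'o' _ (by simp) (by decide)]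

theorem chain_m_ne (t : List Char) (h : t.head? ≠ some 'a') :
    chain ('m' :: t) = 'm' :: chain t := by
  have h2 : (PySem.Chars.replace (PySem.Chars.replace (PySem.Chars.replace t
      ['a','y','a'] [' ']) ['y','e'] [' ']) ['w','o','o'] [' ']).head? ≠ some 'a' :=
    head?_rep_sp_ne _ (by simp) _ _ (by decide) (head?_rep_sp_ne _ (by simp) _ _ (by decide)
      (head?_rep_sp_ne _ (by simp) _ _ (by decide) h))
  unfold chain
  rw [rep_cons_ne ['a','y','a'] [' '] 'm' _ (by simp) (by decide), rep_cons_ne ['y','e'] [' '] 'm' _ (by simp) (by decide), rep_cons_ne ['w','o','o'] [' '] 'm' _ (by simp) (by decide),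
    replace_neg ['m','a'] [' '] 'm' _ (by simp)
      (by simp [List.isPrefixOf, single_isPrefixOf]; simpa using h2),
    rep_cons_ne [' '] [] 'm' _ (by simp) (by decide)]

theorem chain_pass (c : Char) (t : List Char) (h : c ∉ (['a','y','w','m',' '] : List Char)) :
    chain (c :: t) = c :: chain t := by
  simp only [List.mem_cons] at h
  push Not at h
  unfold chain
  rw [rep_cons_ne ['a','y','a'] [' '] c _ (by simp) (by simp; exact fun hx => h.1 hx.symm),
    rep_cons_ne ['y','e'] [' '] c _ (by simp) (by simp; exact fun hx => h.2.1 hx.symm),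
    rep_cons_ne ['w','o','o'] [' '] c _ (by simp) (by simp; exact fun hx => h.2.2.1 hx.symm),
    rep_cons_ne ['m','a'] [' '] c _ (by simp) (by simp; exact fun hx => h.2.2.2.1 hx.symm),
    rep_cons_ne [' '] [] c _ (by simp) (by simp; exact fun hx => h.2.2.2.2.1 hx.symm)]

theorem dub_true_iff (cs : List Char) : dub cs = true ↔
    ((['a','y','a','a','y','a'] : List Char) <:+: cs ∨ (['y','e','y','e'] : List Char) <:+: cs ∨
     (['w','o','o','w','o','o'] : List Char) <:+: cs ∨ (['m','a','m','a'] : List Char) <:+: cs) := by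
  simp [dub, PySem.Chars.isIn_iff_infix]

theorem dub_cons (c : Char) (s : List Char)
    (h1 : ¬ (['a','y','a','a','y','a'] : List Char) <+: c :: s)
    (h2 : ¬ (['y','e','y','e'] : List Char) <+: c :: s)
    (h3 : ¬ (['w','o','o','w','o','o'] : List Char) <+: c :: s)
    (h4 : ¬ (['m','a','m','a'] : List Char) <+: c :: s) :
    dub (c :: s) = dub s := by
  rw [Bool.eq_iff_iff, dub_true_iff, dub_true_iff]
  constructor
  · rintro (hI|hI|hI|hI) <;> rw [List.infix_cons_iff] at hI
    · exact Or.inl (hI.resolve_left h1)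
    · exact Or.inr (Or.inl (hI.resolve_left h2))
    · exact Or.inr (Or.inr (Or.inl (hI.resolve_left h3)))
    · exact Or.inr (Or.inr (Or.inr (hI.resolve_left h4)))
  · rintro (hI|hI|hI|hI)
    · exact Or.inl (List.infix_cons hI)
    · exact Or.inr (Or.inl (List.infix_cons hI))
    · exact Or.inr (Or.inr (Or.inl (List.infix_cons hI)))
    · exact Or.inr (Or.inr (Or.inr (List.infix_cons hI)))

theorem main_sv (cs : List Char) (p : Char)
    (hp : p = ' ' ∨ p = 'a' ∨ p = 'y' ∨ p = 'w' ∨ p = 'm') :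
    sv cs p = ((chain cs).isEmpty && !(dub (tokOf p ++ cs))) := by
  induction cs, p using sv.induct with
  | case1 p =>
    rcases hp with rfl|rfl|rfl|rfl|rfl <;> decide
  | case2 r x ih =>
    have ihr := ih (Or.inl rfl)
    simp only [show tokOf ' ' = [] from by decide, List.nil_append] at ihr
    have hsv : sv (' ' :: r) x = sv r ' ' := by simp [sv]
    rw [hsv, ihr, chain_space]
    rcases hp with rfl|rfl|rfl|rfl|rfl
    · simp only [show tokOf ' ' = ([] : List Char) from by decide, List.nil_append, List.cons_append]
      have e0 : dub (' ' :: r) = dub (r) := dub_cons _ _ (by simp [List.cons_prefix_cons]) (by simp [List.cons_prefix_cons]) (by simp [List.cons_prefix_cons]) (by simp [List.cons_prefix_cons])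
      rw [e0]
    · simp only [show tokOf 'a' = (['a','y','a'] : List Char) from by decide, List.nil_append, List.cons_append]
      have e0 : dub ('a' :: 'y' :: 'a' :: ' ' :: r) = dub ('y' :: 'a' :: ' ' :: r) := dub_cons _ _ (by simp [List.cons_prefix_cons]) (by simp [List.cons_prefix_cons]) (by simp [List.cons_prefix_cons]) (by simp [List.cons_prefix_cons])
      have e1 : dub ('y' :: 'a' :: ' ' :: r) = dub ('a' :: ' ' :: r) := dub_cons _ _ (by simp [List.cons_prefix_cons]) (by simp [List.cons_prefix_cons]) (by simp [List.cons_prefix_cons]) (by simp [List.cons_prefix_cons])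
      have e2 : dub ('a' :: ' ' :: r) = dub (' ' :: r) := dub_cons _ _ (by simp [List.cons_prefix_cons]) (by simp [List.cons_prefix_cons]) (by simp [List.cons_prefix_cons]) (by simp [List.cons_prefix_cons])
      have e3 : dub (' ' :: r) = dub (r) := dub_cons _ _ (by simp [List.cons_prefix_cons]) (by simp [List.cons_prefix_cons]) (by simp [List.cons_prefix_cons]) (by simp [List.cons_prefix_cons])
      rw [e0, e1, e2, e3]
    · simp only [show tokOf 'y' = (['y','e'] : List Char) from by decide, List.nil_append, List.cons_append]
      have e0 : dub ('y' :: 'e' :: ' ' :: r) = dub ('e' :: ' ' :: r) := dub_cons _ _ (by simp [List.cons_prefix_cons]) (by simp [List.cons_prefix_cons]) (by simp [List.cons_prefix_cons]) (by simp [List.cons_prefix_cons])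
      have e1 : dub ('e' :: ' ' :: r) = dub (' ' :: r) := dub_cons _ _ (by simp [List.cons_prefix_cons]) (by simp [List.cons_prefix_cons]) (by simp [List.cons_prefix_cons]) (by simp [List.cons_prefix_cons])
      have e2 : dub (' ' :: r) = dub (r) := dub_cons _ _ (by simp [List.cons_prefix_cons]) (by simp [List.cons_prefix_cons]) (by simp [List.cons_prefix_cons]) (by simp [List.cons_prefix_cons])
      rw [e0, e1, e2]
    · simp only [show tokOf 'w' = (['w','o','o'] : List Char) from by decide, List.nil_append, List.cons_append]
      have e0 : dub ('w' :: 'o' :: 'o' :: ' ' :: r) = dub ('o' :: 'o' :: ' ' :: r) := dub_cons _ _ (by simp [List.cons_prefix_cons]) (by simp [List.cons_prefix_cons]) (by simp [List.cons_prefix_cons]) (by simp [List.cons_prefix_cons])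
      have e1 : dub ('o' :: 'o' :: ' ' :: r) = dub ('o' :: ' ' :: r) := dub_cons _ _ (by simp [List.cons_prefix_cons]) (by simp [List.cons_prefix_cons]) (by simp [List.cons_prefix_cons]) (by simp [List.cons_prefix_cons])
      have e2 : dub ('o' :: ' ' :: r) = dub (' ' :: r) := dub_cons _ _ (by simp [List.cons_prefix_cons]) (by simp [List.cons_prefix_cons]) (by simp [List.cons_prefix_cons]) (by simp [List.cons_prefix_cons])
      have e3 : dub (' ' :: r) = dub (r) := dub_cons _ _ (by simp [List.cons_prefix_cons]) (by simp [List.cons_prefix_cons]) (by simp [List.cons_prefix_cons]) (by simp [List.cons_prefix_cons])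
      rw [e0, e1, e2, e3]
    · simp only [show tokOf 'm' = (['m','a'] : List Char) from by decide, List.nil_append, List.cons_append]
      have e0 : dub ('m' :: 'a' :: ' ' :: r) = dub ('a' :: ' ' :: r) := dub_cons _ _ (by simp [List.cons_prefix_cons]) (by simp [List.cons_prefix_cons]) (by simp [List.cons_prefix_cons]) (by simp [List.cons_prefix_cons])
      have e1 : dub ('a' :: ' ' :: r) = dub (' ' :: r) := dub_cons _ _ (by simp [List.cons_prefix_cons]) (by simp [List.cons_prefix_cons]) (by simp [List.cons_prefix_cons]) (by simp [List.cons_prefix_cons])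
      have e2 : dub (' ' :: r) = dub (r) := dub_cons _ _ (by simp [List.cons_prefix_cons]) (by simp [List.cons_prefix_cons]) (by simp [List.cons_prefix_cons]) (by simp [List.cons_prefix_cons])
      rw [e0, e1, e2]
  | case3 r p ih =>
    have ihr := ih (Or.inr (Or.inl rfl))
    simp only [show tokOf 'a' = (['a','y','a'] : List Char) from by decide] at ihr
    have hsv : sv ('a' :: 'y' :: 'a' :: r) p = ((p != 'a') && sv r 'a') := by simp [sv]
    have hdd : dub ('a' :: 'y' :: 'a' :: 'a' :: 'y' :: 'a' :: r) = true := by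
      rw [dub_true_iff]
      exact Or.inl (List.IsPrefix.isInfix (List.prefix_append _ _))
    rw [hsv, chain_aya]
    rcases hp with rfl|rfl|rfl|rfl|rfl
    · simp only [show tokOf ' ' = ([] : List Char) from by decide, List.nil_append, List.cons_append, ihr]
      simp [show (' ' != 'a') = true from by decide]
    · rw [show tokOf 'a' = (['a','y','a'] : List Char) from by decide]
      simp only [List.cons_append, List.nil_append] at hdd ⊢
      simp [hdd]
    · simp only [show tokOf 'y' = (['y','e'] : List Char) from by decide, List.nil_append, List.cons_append, ihr]
      have e0 : dub ('y' :: 'e' :: 'a' :: 'y' :: 'a' :: r) = dub ('e' :: 'a' :: 'y' :: 'a' :: r) := dub_cons _ _ (by simp [List.cons_prefix_cons]) (by simp [List.cons_prefix_cons]) (by simp [List.cons_prefix_cons]) (by simp [List.cons_prefix_cons])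
      have e1 : dub ('e' :: 'a' :: 'y' :: 'a' :: r) = dub ('a' :: 'y' :: 'a' :: r) := dub_cons _ _ (by simp [List.cons_prefix_cons]) (by simp [List.cons_prefix_cons]) (by simp [List.cons_prefix_cons]) (by simp [List.cons_prefix_cons])
      rw [e0, e1]
      simp [show ('y' != 'a') = true from by decide]
    · simp only [show tokOf 'w' = (['w','o','o'] : List Char) from by decide, List.nil_append, List.cons_append, ihr]
      have e0 : dub ('w' :: 'o' :: 'o' :: 'a' :: 'y' :: 'a' :: r) = dub ('o' :: 'o' :: 'a' :: 'y' :: 'a' :: r) := dub_cons _ _ (by simp [List.cons_prefix_cons]) (by simp [List.cons_prefix_cons]) (by simp [List.cons_prefix_cons]) (by simp [List.cons_prefix_cons])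
      have e1 : dub ('o' :: 'o' :: 'a' :: 'y' :: 'a' :: r) = dub ('o' :: 'a' :: 'y' :: 'a' :: r) := dub_cons _ _ (by simp [List.cons_prefix_cons]) (by simp [List.cons_prefix_cons]) (by simp [List.cons_prefix_cons]) (by simp [List.cons_prefix_cons])
      have e2 : dub ('o' :: 'a' :: 'y' :: 'a' :: r) = dub ('a' :: 'y' :: 'a' :: r) := dub_cons _ _ (by simp [List.cons_prefix_cons]) (by simp [List.cons_prefix_cons]) (by simp [List.cons_prefix_cons]) (by simp [List.cons_prefix_cons])
      rw [e0, e1, e2]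
      simp [show ('w' != 'a') = true from by decide]
    · simp only [show tokOf 'm' = (['m','a'] : List Char) from by decide, List.nil_append, List.cons_append, ihr]
      have e0 : dub ('m' :: 'a' :: 'a' :: 'y' :: 'a' :: r) = dub ('a' :: 'a' :: 'y' :: 'a' :: r) := dub_cons _ _ (by simp [List.cons_prefix_cons]) (by simp [List.cons_prefix_cons]) (by simp [List.cons_prefix_cons]) (by simp [List.cons_prefix_cons])
      have e1 : dub ('a' :: 'a' :: 'y' :: 'a' :: r) = dub ('a' :: 'y' :: 'a' :: r) := dub_cons _ _ (by simp [List.cons_prefix_cons]) (by simp [List.cons_prefix_cons]) (by simp [List.cons_prefix_cons]) (by simp [List.cons_prefix_cons])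
      rw [e0, e1]
      simp [show ('m' != 'a') = true from by decide]
  | case4 r p ih =>
    have ihr := ih (Or.inr (Or.inr (Or.inl rfl)))
    simp only [show tokOf 'y' = (['y','e'] : List Char) from by decide] at ihr
    have hsv : sv ('y' :: 'e' :: r) p = ((p != 'y') && sv r 'y') := by simp [sv]
    have hdd : dub ('y' :: 'e' :: 'y' :: 'e' :: r) = true := by
      rw [dub_true_iff]
      exact Or.inr (Or.inl (List.IsPrefix.isInfix (List.prefix_append _ _)))
    rw [hsv, chain_ye]
    rcases hp with rfl|rfl|rfl|rfl|rfl
    · simp only [show tokOf ' ' = ([] : List Char) from by decide, List.nil_append, List.cons_append, ihr]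
      simp [show (' ' != 'y') = true from by decide]
    · simp only [show tokOf 'a' = (['a','y','a'] : List Char) from by decide, List.nil_append, List.cons_append, ihr]
      have e0 : dub ('a' :: 'y' :: 'a' :: 'y' :: 'e' :: r) = dub ('y' :: 'a' :: 'y' :: 'e' :: r) := dub_cons _ _ (by simp [List.cons_prefix_cons]) (by simp [List.cons_prefix_cons]) (by simp [List.cons_prefix_cons]) (by simp [List.cons_prefix_cons])
      have e1 : dub ('y' :: 'a' :: 'y' :: 'e' :: r) = dub ('a' :: 'y' :: 'e' :: r) := dub_cons _ _ (by simp [List.cons_prefix_cons]) (by simp [List.cons_prefix_cons]) (by simp [List.cons_prefix_cons]) (by simp [List.cons_prefix_cons])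
      have e2 : dub ('a' :: 'y' :: 'e' :: r) = dub ('y' :: 'e' :: r) := dub_cons _ _ (by simp [List.cons_prefix_cons]) (by simp [List.cons_prefix_cons]) (by simp [List.cons_prefix_cons]) (by simp [List.cons_prefix_cons])
      rw [e0, e1, e2]
      simp [show ('a' != 'y') = true from by decide]
    · rw [show tokOf 'y' = (['y','e'] : List Char) from by decide]
      simp only [List.cons_append, List.nil_append] at hdd ⊢
      simp [hdd]
    · simp only [show tokOf 'w' = (['w','o','o'] : List Char) from by decide, List.nil_append, List.cons_append, ihr]
      have e0 : dub ('w' :: 'o' :: 'o' :: 'y' :: 'e' :: r) = dub ('o' :: 'o' :: 'y' :: 'e' :: r) := dub_cons _ _ (by simp [List.cons_prefix_cons]) (by simp [List.cons_prefix_cons]) (by simp [List.cons_prefix_cons]) (by simp [List.cons_prefix_cons])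
      have e1 : dub ('o' :: 'o' :: 'y' :: 'e' :: r) = dub ('o' :: 'y' :: 'e' :: r) := dub_cons _ _ (by simp [List.cons_prefix_cons]) (by simp [List.cons_prefix_cons]) (by simp [List.cons_prefix_cons]) (by simp [List.cons_prefix_cons])
      have e2 : dub ('o' :: 'y' :: 'e' :: r) = dub ('y' :: 'e' :: r) := dub_cons _ _ (by simp [List.cons_prefix_cons]) (by simp [List.cons_prefix_cons]) (by simp [List.cons_prefix_cons]) (by simp [List.cons_prefix_cons])
      rw [e0, e1, e2]
      simp [show ('w' != 'y') = true from by decide]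
    · simp only [show tokOf 'm' = (['m','a'] : List Char) from by decide, List.nil_append, List.cons_append, ihr]
      have e0 : dub ('m' :: 'a' :: 'y' :: 'e' :: r) = dub ('a' :: 'y' :: 'e' :: r) := dub_cons _ _ (by simp [List.cons_prefix_cons]) (by simp [List.cons_prefix_cons]) (by simp [List.cons_prefix_cons]) (by simp [List.cons_prefix_cons])
      have e1 : dub ('a' :: 'y' :: 'e' :: r) = dub ('y' :: 'e' :: r) := dub_cons _ _ (by simp [List.cons_prefix_cons]) (by simp [List.cons_prefix_cons]) (by simp [List.cons_prefix_cons]) (by simp [List.cons_prefix_cons])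
      rw [e0, e1]
      simp [show ('m' != 'y') = true from by decide]
  | case5 r p ih =>
    have ihr := ih (Or.inr (Or.inr (Or.inr (Or.inl rfl))))
    simp only [show tokOf 'w' = (['w','o','o'] : List Char) from by decide] at ihr
    have hsv : sv ('w' :: 'o' :: 'o' :: r) p = ((p != 'w') && sv r 'w') := by simp [sv]
    have hdd : dub ('w' :: 'o' :: 'o' :: 'w' :: 'o' :: 'o' :: r) = true := by
      rw [dub_true_iff]
      exact Or.inr (Or.inr (Or.inl (List.IsPrefix.isInfix (List.prefix_append _ _))))
    rw [hsv, chain_woo]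
    rcases hp with rfl|rfl|rfl|rfl|rfl
    · simp only [show tokOf ' ' = ([] : List Char) from by decide, List.nil_append, List.cons_append, ihr]
      simp [show (' ' != 'w') = true from by decide]
    · simp only [show tokOf 'a' = (['a','y','a'] : List Char) from by decide, List.nil_append, List.cons_append, ihr]
      have e0 : dub ('a' :: 'y' :: 'a' :: 'w' :: 'o' :: 'o' :: r) = dub ('y' :: 'a' :: 'w' :: 'o' :: 'o' :: r) := dub_cons _ _ (by simp [List.cons_prefix_cons]) (by simp [List.cons_prefix_cons]) (by simp [List.cons_prefix_cons]) (by simp [List.cons_prefix_cons])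
      have e1 : dub ('y' :: 'a' :: 'w' :: 'o' :: 'o' :: r) = dub ('a' :: 'w' :: 'o' :: 'o' :: r) := dub_cons _ _ (by simp [List.cons_prefix_cons]) (by simp [List.cons_prefix_cons]) (by simp [List.cons_prefix_cons]) (by simp [List.cons_prefix_cons])
      have e2 : dub ('a' :: 'w' :: 'o' :: 'o' :: r) = dub ('w' :: 'o' :: 'o' :: r) := dub_cons _ _ (by simp [List.cons_prefix_cons]) (by simp [List.cons_prefix_cons]) (by simp [List.cons_prefix_cons]) (by simp [List.cons_prefix_cons])
      rw [e0, e1, e2]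
      simp [show ('a' != 'w') = true from by decide]
    · simp only [show tokOf 'y' = (['y','e'] : List Char) from by decide, List.nil_append, List.cons_append, ihr]
      have e0 : dub ('y' :: 'e' :: 'w' :: 'o' :: 'o' :: r) = dub ('e' :: 'w' :: 'o' :: 'o' :: r) := dub_cons _ _ (by simp [List.cons_prefix_cons]) (by simp [List.cons_prefix_cons]) (by simp [List.cons_prefix_cons]) (by simp [List.cons_prefix_cons])
      have e1 : dub ('e' :: 'w' :: 'o' :: 'o' :: r) = dub ('w' :: 'o' :: 'o' :: r) := dub_cons _ _ (by simp [List.cons_prefix_cons]) (by simp [List.cons_prefix_cons]) (by simp [List.cons_prefix_cons]) (by simp [List.cons_prefix_cons])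
      rw [e0, e1]
      simp [show ('y' != 'w') = true from by decide]
    · rw [show tokOf 'w' = (['w','o','o'] : List Char) from by decide]
      simp only [List.cons_append, List.nil_append] at hdd ⊢
      simp [hdd]
    · simp only [show tokOf 'm' = (['m','a'] : List Char) from by decide, List.nil_append, List.cons_append, ihr]
      have e0 : dub ('m' :: 'a' :: 'w' :: 'o' :: 'o' :: r) = dub ('a' :: 'w' :: 'o' :: 'o' :: r) := dub_cons _ _ (by simp [List.cons_prefix_cons]) (by simp [List.cons_prefix_cons]) (by simp [List.cons_prefix_cons]) (by simp [List.cons_prefix_cons])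
      have e1 : dub ('a' :: 'w' :: 'o' :: 'o' :: r) = dub ('w' :: 'o' :: 'o' :: r) := dub_cons _ _ (by simp [List.cons_prefix_cons]) (by simp [List.cons_prefix_cons]) (by simp [List.cons_prefix_cons]) (by simp [List.cons_prefix_cons])
      rw [e0, e1]
      simp [show ('m' != 'w') = true from by decide]
  | case6 r p ih =>
    have ihr := ih (Or.inr (Or.inr (Or.inr (Or.inr rfl))))
    simp only [show tokOf 'm' = (['m','a'] : List Char) from by decide] at ihr
    have hsv : sv ('m' :: 'a' :: r) p = ((p != 'm') && sv r 'm') := by simp [sv]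
    have hdd : dub ('m' :: 'a' :: 'm' :: 'a' :: r) = true := by
      rw [dub_true_iff]
      exact Or.inr (Or.inr (Or.inr (List.IsPrefix.isInfix (List.prefix_append _ _))))
    by_cases hya : (['y','a'] : List Char).isPrefixOf r = true
    · obtain ⟨u, hu⟩ := List.isPrefixOf_iff_prefix.mp hya
      subst hu
      have hfalse : sv ('y' :: 'a' :: u) 'm' = false := by simp [sv]
      rw [hsv]
      simp only [List.cons_append, List.nil_append] at hfalse ⊢
      by_cases hpm : p = 'm'
      · subst hpm; simp [chain_maya]
      · rw [show (p != 'm') = true from by simp [hpm], Bool.true_and, hfalse, chain_maya]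
        simp
    · rw [hsv, chain_ma r (by revert hya; cases (['y','a'] : List Char).isPrefixOf r <;> simp)]
      rcases hp with rfl|rfl|rfl|rfl|rfl
      · simp only [show tokOf ' ' = ([] : List Char) from by decide, List.nil_append, List.cons_append, ihr]
        simp [show (' ' != 'm') = true from by decide]
      · simp only [show tokOf 'a' = (['a','y','a'] : List Char) from by decide, List.nil_append, List.cons_append, ihr]
        have e0 : dub ('a' :: 'y' :: 'a' :: 'm' :: 'a' :: r) = dub ('y' :: 'a' :: 'm' :: 'a' :: r) := dub_cons _ _ (by simp [List.cons_prefix_cons]) (by simp [List.cons_prefix_cons]) (by simp [List.cons_prefix_cons]) (by simp [List.cons_prefix_cons])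
        have e1 : dub ('y' :: 'a' :: 'm' :: 'a' :: r) = dub ('a' :: 'm' :: 'a' :: r) := dub_cons _ _ (by simp [List.cons_prefix_cons]) (by simp [List.cons_prefix_cons]) (by simp [List.cons_prefix_cons]) (by simp [List.cons_prefix_cons])
        have e2 : dub ('a' :: 'm' :: 'a' :: r) = dub ('m' :: 'a' :: r) := dub_cons _ _ (by simp [List.cons_prefix_cons]) (by simp [List.cons_prefix_cons]) (by simp [List.cons_prefix_cons]) (by simp [List.cons_prefix_cons])
        rw [e0, e1, e2]
        simp [show ('a' != 'm') = true from by decide]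
      · simp only [show tokOf 'y' = (['y','e'] : List Char) from by decide, List.nil_append, List.cons_append, ihr]
        have e0 : dub ('y' :: 'e' :: 'm' :: 'a' :: r) = dub ('e' :: 'm' :: 'a' :: r) := dub_cons _ _ (by simp [List.cons_prefix_cons]) (by simp [List.cons_prefix_cons]) (by simp [List.cons_prefix_cons]) (by simp [List.cons_prefix_cons])
        have e1 : dub ('e' :: 'm' :: 'a' :: r) = dub ('m' :: 'a' :: r) := dub_cons _ _ (by simp [List.cons_prefix_cons]) (by simp [List.cons_prefix_cons]) (by simp [List.cons_prefix_cons]) (by simp [List.cons_prefix_cons])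
        rw [e0, e1]
        simp [show ('y' != 'm') = true from by decide]
      · simp only [show tokOf 'w' = (['w','o','o'] : List Char) from by decide, List.nil_append, List.cons_append, ihr]
        have e0 : dub ('w' :: 'o' :: 'o' :: 'm' :: 'a' :: r) = dub ('o' :: 'o' :: 'm' :: 'a' :: r) := dub_cons _ _ (by simp [List.cons_prefix_cons]) (by simp [List.cons_prefix_cons]) (by simp [List.cons_prefix_cons]) (by simp [List.cons_prefix_cons])
        have e1 : dub ('o' :: 'o' :: 'm' :: 'a' :: r) = dub ('o' :: 'm' :: 'a' :: r) := dub_cons _ _ (by simp [List.cons_prefix_cons]) (by simp [List.cons_prefix_cons]) (by simp [List.cons_prefix_cons]) (by simp [List.cons_prefix_cons])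
        have e2 : dub ('o' :: 'm' :: 'a' :: r) = dub ('m' :: 'a' :: r) := dub_cons _ _ (by simp [List.cons_prefix_cons]) (by simp [List.cons_prefix_cons]) (by simp [List.cons_prefix_cons]) (by simp [List.cons_prefix_cons])
        rw [e0, e1, e2]
        simp [show ('w' != 'm') = true from by decide]
      · rw [show tokOf 'm' = (['m','a'] : List Char) from by decide]
        simp only [List.cons_append, List.nil_append] at hdd ⊢
        simp [hdd]
  | case7 t x h0 h1 h2 h3 h4 h5 =>
    have hfalse : sv t x = false := by
      rw [sv.eq_def]
      split
      · exact (h0 rfl).elim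
      · exact (h1 _ rfl).elim
      · exact (h2 _ rfl).elim
      · exact (h3 _ rfl).elim
      · exact (h4 _ rfl).elim
      · exact (h5 _ rfl).elim
      · rfl
    obtain ⟨c, u, rfl⟩ : ∃ c u, t = c :: u := by
      cases t with
      | nil => exact (h0 rfl).elim
      | cons c u => exact ⟨c, u, rfl⟩
    have hne : chain (c :: u) ≠ [] := by
      by_cases hca : c = 'a'
      · subst hca
        have hp2 : (['y','a'] : List Char).isPrefixOf u = false := by
          cases hcon : (['y','a'] : List Char).isPrefixOf u with
          | false => rfl
          | true =>
            obtain ⟨v, hv⟩ := List.isPrefixOf_iff_prefix.mp hcon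
            exact (h2 v (by rw [← hv]; rfl)).elim
        rw [chain_a_ne u hp2]; simp
      · by_cases hcy : c = 'y'
        · subst hcy
          have hh : u.head? ≠ some 'e' := by
            intro hh
            cases u with
            | nil => simp at hh
            | cons d v => simp at hh; exact h3 v (by rw [hh])
          rw [chain_y_ne u hh]; simp
        · by_cases hcw : c = 'w'
          · subst hcw
            cases u with
            | nil => rw [chain_w_ne1 [] (by simp)]; simp
            | cons d v =>
              by_cases hdo : d = 'o'
              · subst hdo
                have hh : v.head? ≠ some 'o' := by
                  intro hh
                  cases v with
                  | nil => simp at hh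
                  | cons e w => simp at hh; exact h4 w (by rw [hh])
                rw [chain_w_ne2 v hh]; simp
              · rw [chain_w_ne1 (d :: v) (by simp [hdo])]; simp
          · by_cases hcm : c = 'm'
            · subst hcm
              have hh : u.head? ≠ some 'a' := by
                intro hh
                cases u with
                | nil => simp at hh
                | cons d v => simp at hh; exact h5 v (by rw [hh])
              rw [chain_m_ne u hh]; simp
            · by_cases hcs : c = ' '
              · subst hcs; exact (h1 u rfl).elim
              · rw [chain_pass c u (by simp [hca, hcy, hcw, hcm, hcs])]; simp
    rw [hfalse]
    have hie : (chain (c :: u)).isEmpty = false := by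
      cases hch : chain (c :: u) with
      | nil => exact (hne hch).elim
      | cons a b => rfl
    simp [hie]
theorem sv_a_false (u : List Char) (p : Char) (h : ∀ r, u ≠ 'y' :: 'a' :: r) :
    sv ('a' :: u) p = false := by
  rw [sv.eq_def]
  split <;> first | rfl | simp_all
theorem sv_y_false (u : List Char) (p : Char) (h : ∀ r, u ≠ 'e' :: r) :
    sv ('y' :: u) p = false := by
  rw [sv.eq_def]
  split <;> first | rfl | simp_all
theorem sv_w_false (u : List Char) (p : Char) (h : ∀ r, u ≠ 'o' :: 'o' :: r) :
    sv ('w' :: u) p = false := by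
  rw [sv.eq_def]
  split <;> first | rfl | simp_all
theorem sv_m_false (u : List Char) (p : Char) (h : ∀ r, u ≠ 'a' :: r) :
    sv ('m' :: u) p = false := by
  rw [sv.eq_def]
  split <;> first | rfl | simp_all
theorem sv_other_false (c : Char) (u : List Char) (p : Char)
    (hc : c ∉ (['a','y','w','m',' '] : List Char)) :
    sv (c :: u) p = false := by
  simp only [List.mem_cons] at hc
  push Not at hc
  rw [sv.eq_def]
  split <;> first | rfl | simp_all

theorem bgo_eq : ∀ (fuel : Nat) (cs : List Char) (p : Char),
    (p = ' ' ∨ p = 'a' ∨ p = 'y' ∨ p = 'w' ∨ p = 'm') → cs.length ≤ fuel →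
    bValidGo fuel cs (tokOf p) = (!(cs.contains ' ') && sv cs p) := by
  intro fuel
  induction fuel with
  | zero =>
    intro cs p hp hl
    have : cs = [] := List.eq_nil_of_length_eq_zero (Nat.le_zero.mp hl)
    subst this
    simp [bValidGo, sv]
  | succ fuel ih =>
    intro cs p hp hl
    match cs with
    | [] => simp [bValidGo, sv]
    | c :: rest =>
      by_cases hca : c = 'a'
      · subst hca
        have ht : PySem.Dict.getD bTokens 'a' [] = ['a','y','a'] := by decide
        have hiff : ((['a','y','a'] : List Char) = tokOf p) ↔ p = 'a' := by
          rcases hp with rfl|rfl|rfl|rfl|rfl <;> decide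
        rw [show bValidGo (fuel+1) ('a' :: rest) (tokOf p) =
            (if (['a','y','a'] : List Char) = [] ∨ (['a','y','a'] : List Char) = tokOf p ∨
                ¬ (['a','y','a'] : List Char).isPrefixOf ('a' :: rest) then false
             else bValidGo fuel (('a' :: rest).drop (['a','y','a'] : List Char).length) ['a','y','a'])
          from by rw [bValidGo.eq_def]; simp [ht]]
        by_cases hpre : (['a','y','a'] : List Char).isPrefixOf ('a' :: rest)
        · obtain ⟨r, hr⟩ := List.isPrefixOf_iff_prefix.mp hpre
          simp only [List.cons_append, List.nil_append, List.cons.injEq, true_and] at hr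
          have hrest : rest = 'y' :: 'a' :: r := hr.symm
          subst hrest
          have hlen : r.length ≤ fuel := by
            simp only [List.length_cons] at hl
            omega
          have hsv : sv ('a' :: 'y' :: 'a' :: r) p = ((p != 'a') && sv r 'a') := by simp [sv]
          by_cases hprev : p = 'a'
          · rw [if_pos (Or.inr (Or.inl (hiff.mpr hprev)))]
            rw [hsv, show (p != 'a') = false from by simp [hprev]]
            simp
          · rw [if_neg (by
              simp only [hiff]
              simp [hprev, hpre])]
            have hdrop : (('a' :: 'y' :: 'a' :: r).drop (['a','y','a'] : List Char).length) = r := by simp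
            rw [hdrop, show (['a','y','a'] : List Char) = tokOf 'a' from by decide,
              ih r 'a' (Or.inr (Or.inl rfl)) hlen, hsv,
              show (p != 'a') = true from by simp [hprev]]
            simp
        · rw [if_pos (Or.inr (Or.inr hpre))]
          rw [sv_a_false rest p (fun r hr => hpre (by rw [hr]; simp [List.isPrefixOf]))]
          simp
      by_cases hcy : c = 'y'
      · subst hcy
        have ht : PySem.Dict.getD bTokens 'y' [] = ['y','e'] := by decide
        have hiff : ((['y','e'] : List Char) = tokOf p) ↔ p = 'y' := by
          rcases hp with rfl|rfl|rfl|rfl|rfl <;> decide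
        rw [show bValidGo (fuel+1) ('y' :: rest) (tokOf p) =
            (if (['y','e'] : List Char) = [] ∨ (['y','e'] : List Char) = tokOf p ∨
                ¬ (['y','e'] : List Char).isPrefixOf ('y' :: rest) then false
             else bValidGo fuel (('y' :: rest).drop (['y','e'] : List Char).length) ['y','e'])
          from by rw [bValidGo.eq_def]; simp [ht]]
        by_cases hpre : (['y','e'] : List Char).isPrefixOf ('y' :: rest)
        · obtain ⟨r, hr⟩ := List.isPrefixOf_iff_prefix.mp hpre
          simp only [List.cons_append, List.nil_append, List.cons.injEq, true_and] at hr
          have hrest : rest = 'e' :: r := hr.symm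
          subst hrest
          have hlen : r.length ≤ fuel := by
            simp only [List.length_cons] at hl
            omega
          have hsv : sv ('y' :: 'e' :: r) p = ((p != 'y') && sv r 'y') := by simp [sv]
          by_cases hprev : p = 'y'
          · rw [if_pos (Or.inr (Or.inl (hiff.mpr hprev)))]
            rw [hsv, show (p != 'y') = false from by simp [hprev]]
            simp
          · rw [if_neg (by
              simp only [hiff]
              simp [hprev, hpre])]
            have hdrop : (('y' :: 'e' :: r).drop (['y','e'] : List Char).length) = r := by simp
            rw [hdrop, show (['y','e'] : List Char) = tokOf 'y' from by decide,
              ih r 'y' (Or.inr (Or.inr (Or.inl rfl))) hlen, hsv,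
              show (p != 'y') = true from by simp [hprev]]
            simp
        · rw [if_pos (Or.inr (Or.inr hpre))]
          rw [sv_y_false rest p (fun r hr => hpre (by rw [hr]; simp [List.isPrefixOf]))]
          simp
      by_cases hcw : c = 'w'
      · subst hcw
        have ht : PySem.Dict.getD bTokens 'w' [] = ['w','o','o'] := by decide
        have hiff : ((['w','o','o'] : List Char) = tokOf p) ↔ p = 'w' := by
          rcases hp with rfl|rfl|rfl|rfl|rfl <;> decide
        rw [show bValidGo (fuel+1) ('w' :: rest) (tokOf p) =
            (if (['w','o','o'] : List Char) = [] ∨ (['w','o','o'] : List Char) = tokOf p ∨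
                ¬ (['w','o','o'] : List Char).isPrefixOf ('w' :: rest) then false
             else bValidGo fuel (('w' :: rest).drop (['w','o','o'] : List Char).length) ['w','o','o'])
          from by rw [bValidGo.eq_def]; simp [ht]]
        by_cases hpre : (['w','o','o'] : List Char).isPrefixOf ('w' :: rest)
        · obtain ⟨r, hr⟩ := List.isPrefixOf_iff_prefix.mp hpre
          simp only [List.cons_append, List.nil_append, List.cons.injEq, true_and] at hr
          have hrest : rest = 'o' :: 'o' :: r := hr.symm
          subst hrest
          have hlen : r.length ≤ fuel := by
            simp only [List.length_cons] at hl
            omega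
          have hsv : sv ('w' :: 'o' :: 'o' :: r) p = ((p != 'w') && sv r 'w') := by simp [sv]
          by_cases hprev : p = 'w'
          · rw [if_pos (Or.inr (Or.inl (hiff.mpr hprev)))]
            rw [hsv, show (p != 'w') = false from by simp [hprev]]
            simp
          · rw [if_neg (by
              simp only [hiff]
              simp [hprev, hpre])]
            have hdrop : (('w' :: 'o' :: 'o' :: r).drop (['w','o','o'] : List Char).length) = r := by simp
            rw [hdrop, show (['w','o','o'] : List Char) = tokOf 'w' from by decide,
              ih r 'w' (Or.inr (Or.inr (Or.inr (Or.inl rfl)))) hlen, hsv,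
              show (p != 'w') = true from by simp [hprev]]
            simp
        · rw [if_pos (Or.inr (Or.inr hpre))]
          rw [sv_w_false rest p (fun r hr => hpre (by rw [hr]; simp [List.isPrefixOf]))]
          simp
      by_cases hcm : c = 'm'
      · subst hcm
        have ht : PySem.Dict.getD bTokens 'm' [] = ['m','a'] := by decide
        have hiff : ((['m','a'] : List Char) = tokOf p) ↔ p = 'm' := by
          rcases hp with rfl|rfl|rfl|rfl|rfl <;> decide
        rw [show bValidGo (fuel+1) ('m' :: rest) (tokOf p) =
            (if (['m','a'] : List Char) = [] ∨ (['m','a'] : List Char) = tokOf p ∨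
                ¬ (['m','a'] : List Char).isPrefixOf ('m' :: rest) then false
             else bValidGo fuel (('m' :: rest).drop (['m','a'] : List Char).length) ['m','a'])
          from by rw [bValidGo.eq_def]; simp [ht]]
        by_cases hpre : (['m','a'] : List Char).isPrefixOf ('m' :: rest)
        · obtain ⟨r, hr⟩ := List.isPrefixOf_iff_prefix.mp hpre
          simp only [List.cons_append, List.nil_append, List.cons.injEq, true_and] at hr
          have hrest : rest = 'a' :: r := hr.symm
          subst hrest
          have hlen : r.length ≤ fuel := by
            simp only [List.length_cons] at hl
            omega
          have hsv : sv ('m' :: 'a' :: r) p = ((p != 'm') && sv r 'm') := by simp [sv]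
          by_cases hprev : p = 'm'
          · rw [if_pos (Or.inr (Or.inl (hiff.mpr hprev)))]
            rw [hsv, show (p != 'm') = false from by simp [hprev]]
            simp
          · rw [if_neg (by
              simp only [hiff]
              simp [hprev, hpre])]
            have hdrop : (('m' :: 'a' :: r).drop (['m','a'] : List Char).length) = r := by simp
            rw [hdrop, show (['m','a'] : List Char) = tokOf 'm' from by decide,
              ih r 'm' (Or.inr (Or.inr (Or.inr (Or.inr rfl)))) hlen, hsv,
              show (p != 'm') = true from by simp [hprev]]
            simp
        · rw [if_pos (Or.inr (Or.inr hpre))]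
          rw [sv_m_false rest p (fun r hr => hpre (by rw [hr]; simp [List.isPrefixOf]))]
          simp
      · by_cases hcs : c = ' '
        · subst hcs
          have ht : PySem.Dict.getD bTokens ' ' [] = [] := by decide
          rw [show bValidGo (fuel+1) (' ' :: rest) (tokOf p) = false
            from by rw [bValidGo.eq_def]; simp [ht]]
          simp
        · have ht : PySem.Dict.getD bTokens c [] = [] := by
            have hitems : bTokens.items =
                [('a',['a','y','a']),('y',['y','e']),('w',['w','o','o']),('m',['m','a'])] := by
              decide
            simp [PySem.Dict.getD, PySem.Dict.get?, hitems, List.find?_cons_of_neg,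
              show ('a' == c) = false from by simp [Ne.symm hca],
              show ('y' == c) = false from by simp [Ne.symm hcy],
              show ('w' == c) = false from by simp [Ne.symm hcw],
              show ('m' == c) = false from by simp [Ne.symm hcm]]
          rw [show bValidGo (fuel+1) (c :: rest) (tokOf p) = false
            from by rw [bValidGo.eq_def]; simp [ht]]
          rw [sv_other_false c rest p (by simp [hca, hcy, hcw, hcm, hcs])]
          simp

theorem stepA (ans : Int) (w : String) :
    (if (["ayaaya","yeye","woowoo","mama"].any (fun j => PySem.Str.isIn j w)) then ans
     else
       let d := ["aya","ye","woo","ma"].foldl (fun d j => PySem.Str.replace d j " ") w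
       let d := PySem.Str.replace d " " ""
       if d = "" then ans + 1 else ans)
    = ans + (if sv w.toList ' ' then 1 else 0) := by
  have hmain := main_sv w.toList ' ' (Or.inl rfl)
  simp only [show tokOf ' ' = [] from by decide, List.nil_append] at hmain
  have hdub : (["ayaaya","yeye","woowoo","mama"].any (fun j => PySem.Str.isIn j w)) = dub w.toList := rfl
  have hch : (PySem.Str.replace (["aya","ye","woo","ma"].foldl
      (fun d j => PySem.Str.replace d j " ") w) " " "").toList = chain w.toList := by
    simp only [List.foldl_cons, List.foldl_nil, PySem.Str.toList_replace, chain,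
      show "aya".toList = ['a','y','a'] from rfl, show "ye".toList = ['y','e'] from rfl,
      show "woo".toList = ['w','o','o'] from rfl, show "ma".toList = ['m','a'] from rfl,
      show " ".toList = [' '] from rfl, show "".toList = ([] : List Char) from rfl]
  have hempty : ((PySem.Str.replace (["aya","ye","woo","ma"].foldl
      (fun d j => PySem.Str.replace d j " ") w) " " "") = "") ↔ chain w.toList = [] := by
    rw [← String.toList_eq_nil_iff, hch]
  rw [hmain]
  cases hd : dub w.toList with
  | true =>
    rw [hdub, hd]
    simp
  | false =>
    rw [hdub, hd]
    simp only [Bool.false_eq_true, if_false]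
    have hie : ∀ (l : List Char), l ≠ [] → l.isEmpty = false := by
      intro l hl
      cases l with
      | nil => exact (hl rfl).elim
      | cons a b => rfl
    by_cases hc2 : chain w.toList = []
    · rw [if_pos (hempty.mpr hc2)]
      simp [hc2]
    · rw [if_neg (fun h => hc2 (hempty.mp h))]
      simp [hie _ hc2]

theorem A_sum (b : List String) :
    solution b = (b.map (fun w => if sv w.toList ' ' then (1:Int) else 0)).sum := by
  unfold solution
  simp only [stepA]
  rw [PySem.List.foldl_add]
  simp

theorem bValid_eq (cs : List Char) : bValid cs = (!(cs.contains ' ') && sv cs ' ') := by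
  rw [bValid, show ([] : List Char) = tokOf ' ' from by decide]
  exact bgo_eq cs.length cs ' ' (Or.inl rfl) (Nat.le_refl _)

theorem B_sum (b : List String) :
    solution_alt b = (b.map (fun w =>
      if (!(w.toList.contains ' ') && sv w.toList ' ') then (1:Int) else 0)).sum := by
  unfold solution_alt
  simp only [bValid_eq]

-- ===== VERDICT (by name: the statement is the Claim_ definition above) =====
theorem solution_spec : Claim_equal_solution := by
  intro b _ hpre
  unfold Spec_solution
  rw [A_sum, B_sum]
  apply congrArg List.sum
  apply List.map_congr_left
  intro w hw
  by_cases hsp : ' ' ∈ w.toList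
  · have hsv : sv w.toList ' ' = false := by
      cases hsv : sv w.toList ' ' with
      | true => exact absurd ⟨hsp, hsv⟩ (hpre w hw)
      | false => rfl
    simp [hsv]
  · simp [hsp]
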